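-- pv_equiv track=rewrite | github.com/cake2000/CreatiCodeSkillMap | apply_g5_dependencies.py | update_depends_on
-- ===== SOURCE A (Python) =====
-- def update_depends_on(skill_lines, current_deps, new_deps):
--     """
--     Update the Dependencies field in skill_lines.
--     Returns updated skill_lines.
--     """
--     # Combine current and new dependencies, removing duplicates while preserving order
--     all_deps = list(dict.fromkeys(current_deps + new_deps))
--
--     # Find the Dependencies line
--     depends_line_idx = None
--     for i, line in enumerate(skill_lines):
--         if line.strip().startswith('Dependencies:'):
--             depends_line_idx = i
--             break
--
--     if depends_line_idx is None:
--         # No Dependencies field exists - need to add one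
--         # Find where to insert (after Description, before blank line at end)
--         insert_idx = len(skill_lines) - 1  # Before the final blank line
--         for i in range(len(skill_lines) - 1, -1, -1):
--             if skill_lines[i].strip().startswith('Description:'):
--                 # Skip to end of description (multiline)
--                 j = i + 1
--                 while j < len(skill_lines) and (skill_lines[j].startswith('  ') or not skill_lines[j].strip()):
--                     if skill_lines[j].strip():  # Non-blank line
--                         insert_idx = j + 1
--                     j += 1
--                 insert_idx = j
--                 break
--
--         # Insert Dependencies field in format "* T10.G4.02: Description"
--         skill_lines.insert(insert_idx, '\n')
--         skill_lines.insert(insert_idx + 1, 'Dependencies:\n')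
--         for dep in all_deps:
--             # Add dependency without description (we don't have descriptions in our mapping)
--             skill_lines.insert(insert_idx + 2, f'* {dep}\n')
--             insert_idx += 1
--         skill_lines.insert(insert_idx + 2, '\n')
--     else:
--         # Update existing Dependencies
--         # Find all existing dependency lines and remove them
--         i = depends_line_idx + 1
--         while i < len(skill_lines) and (skill_lines[i].strip().startswith('*') or (skill_lines[i].strip() == '' and i < len(skill_lines) - 1 and skill_lines[i+1].strip().startswith('*'))):
--             skill_lines.pop(i)
--
--         # Add all dependencies (merged list)
--         for j, dep in enumerate(all_deps):
--             skill_lines.insert(depends_line_idx + 1 + j, f'* {dep}\n')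
--
--     return skill_lines
-- ===== SOURCE B (Python) =====
-- def update_depends_on(skill_lines, current_deps, new_deps):
--     """
--     Update the Dependencies field in skill_lines.
--     Returns updated skill_lines (mutated in place via slice assignment).
--     Single forward pass building a fresh output list instead of pop/insert surgery.
--     """
--     seen = set()
--     merged = []
--     for d in current_deps + new_deps:
--         if d not in seen:
--             seen.add(d)
--             merged.append(d)
--     dep_lines = ['* ' + d + '\n' for d in merged]
--
--     n = len(skill_lines)
--     result = []
--     i = 0
--     while i < n and not skill_lines[i].strip().startswith('Dependencies:'):
--         result.append(skill_lines[i])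
--         i += 1
--     if i < n:
--         # Found the Dependencies header: keep it, emit the merged deps,
--         # then copy the rest with the old dependency run skipped.
--         result.append(skill_lines[i])
--         result.extend(dep_lines)
--         i += 1
--         while i < n and (skill_lines[i].strip().startswith('*')
--                          or (not skill_lines[i].strip() and i + 1 < n
--                              and skill_lines[i + 1].strip().startswith('*'))):
--             i += 1
--         result.extend(skill_lines[i:])
--     else:
--         # No Dependencies header: splice a fresh block in after the end of the
--         # last Description (or before the final line if there is none).
--         last_desc = None
--         for k, line in enumerate(skill_lines):
--             if line.strip().startswith('Description:'):
--                 last_desc = k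
--         if last_desc is None:
--             p = n - 1
--         else:
--             p = last_desc + 1
--             while p < n and (skill_lines[p].startswith('  ') or not skill_lines[p].strip()):
--                 p += 1
--         result = skill_lines[:p] + ['\n', 'Dependencies:\n'] + dep_lines + ['\n'] + skill_lines[p:]
--     skill_lines[:] = result
--     return skill_lines
-- ===== Notes on version B (the rewrite author's own statement) =====
-- stated objective: simpler
-- what changed: Replaces A's in-place pop/insert surgery (linear-time pops and inserts inside loops, plus a reverse index scan) with a single forward pass that builds a fresh output list and writes it back by slice assignment; dedup via a seen-set loop instead of dict.fromkeys.
-- intended difference: On empty skill_lines A's insert(-1, ...) negative-index wraparound emits the new block out of order (['Dependencies:\n', deps..., '\n', '\n']); B returns the intended block ['\n', 'Dependencies:\n', deps..., '\n'] exactly as on every other input without a Dependencies header. — e.g. on update_depends_on([], ["a"], []): A returns ["Dependencies:\n", "* a\n", "\n", "\n"], B returns ["\n", "Dependencies:\n", "* a\n", "\n"]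
import Mathlib
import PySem

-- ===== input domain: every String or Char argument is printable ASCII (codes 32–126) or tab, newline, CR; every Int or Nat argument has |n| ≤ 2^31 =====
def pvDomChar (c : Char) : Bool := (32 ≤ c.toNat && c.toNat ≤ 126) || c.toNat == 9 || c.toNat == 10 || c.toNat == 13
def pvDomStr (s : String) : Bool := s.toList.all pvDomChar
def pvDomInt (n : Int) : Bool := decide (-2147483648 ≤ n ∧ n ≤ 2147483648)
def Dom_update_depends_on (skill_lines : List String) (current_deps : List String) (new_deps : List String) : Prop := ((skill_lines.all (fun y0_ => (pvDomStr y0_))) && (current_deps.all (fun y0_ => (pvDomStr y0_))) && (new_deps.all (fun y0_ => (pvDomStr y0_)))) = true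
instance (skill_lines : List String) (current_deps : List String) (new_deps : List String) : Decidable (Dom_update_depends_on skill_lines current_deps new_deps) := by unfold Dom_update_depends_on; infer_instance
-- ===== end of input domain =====

-- B is a single forward pass building a fresh output list instead of A's in-place
-- pop/insert surgery (both Pythons mutate skill_lines; the theorems are about the
-- returned value, which for both equals the final list contents).

-- Shared string tests (the same literal tests appear in both Python sources)
def isDepHdr (s : String) : Bool := PySem.Str.startswith (PySem.Str.strip s) "Dependencies:"
def isDescHdr (s : String) : Bool := PySem.Str.startswith (PySem.Str.strip s) "Description:"
def isStar (s : String) : Bool := PySem.Str.startswith (PySem.Str.strip s) "*"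
def isBlank (s : String) : Bool := PySem.Str.strip s == ""
def depLine (d : String) : String := PySem.Str.join "" ["* ", d, "\n"]   -- f'* {dep}\n'

-- ===== PORT A =====
-- for i, line in enumerate(skill_lines): if line.strip().startswith('Dependencies:'): break
def aFindDep : List (Int × String) → Option Int
  | [] => none
  | (i, l) :: rest => if isDepHdr l then some i else aFindDep rest

-- the j-loop after a Description line; carries A's dead insert_idx slot faithfully
def aDescEnd (lines : List String) (insert_idx j : Int) : Int × Int :=
  if h : j < PySem.List.len lines ∧ (PySem.Str.startswith (PySem.List.pyGetD lines j "") "  " = true ∨ isBlank (PySem.List.pyGetD lines j "") = true) then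
    aDescEnd lines (if isBlank (PySem.List.pyGetD lines j "") = false then j + 1 else insert_idx) (j + 1)
  else (insert_idx, j)
termination_by (PySem.List.len lines - j).toNat
decreasing_by simp [PySem.List.len] at h ⊢; omega

-- for i in range(len-1, -1, -1): if Description: insert_idx = <j-loop>; break
def aRevScan (lines : List String) : List Int → Int → Int
  | [], insert_idx => insert_idx
  | i :: rest, insert_idx =>
      if isDescHdr (PySem.List.pyGetD lines i "") then (aDescEnd lines insert_idx (i + 1)).2
      else aRevScan lines rest insert_idx

-- while i < len(lines) and (...): lines.pop(i)   (pop? = none is unreachable: the guard keeps i in range)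
def aPopLoop (lines : List String) (i : Int) : List String :=
  if h : i < PySem.List.len lines ∧ (isStar (PySem.List.pyGetD lines i "") = true ∨
       (isBlank (PySem.List.pyGetD lines i "") = true ∧ i < PySem.List.len lines - 1 ∧
        isStar (PySem.List.pyGetD lines (i + 1) "") = true)) then
    match hp : PySem.List.pop? lines i with
    | some r => aPopLoop r.2 i
    | none => lines
  else lines
termination_by lines.length
decreasing_by have := PySem.List.length_of_pop?_eq_some lines hp; omega

def update_depends_on (skill_lines : List String) (current_deps : List String) (new_deps : List String) : List String :=
  let all_deps := PySem.List.dedup (current_deps ++ new_deps)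
  match aFindDep (PySem.List.enumerate skill_lines 0) with
  | none =>
      let insert_idx := aRevScan skill_lines
        (PySem.List.pyRange (PySem.List.len skill_lines - 1) (-1) (-1)) (PySem.List.len skill_lines - 1)
      let ls1 := PySem.List.insert skill_lines insert_idx "\n"
      let ls2 := PySem.List.insert ls1 (insert_idx + 1) "Dependencies:\n"
      let st := all_deps.foldl
        (fun (st : List String × Int) dep => (PySem.List.insert st.1 (st.2 + 2) (depLine dep), st.2 + 1))
        (ls2, insert_idx)
      PySem.List.insert st.1 (st.2 + 2) "\n"
  | some d =>
      let popped := aPopLoop skill_lines (d + 1)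
      (PySem.List.enumerate all_deps 0).foldl
        (fun ls p => PySem.List.insert ls (d + 1 + p.1) (depLine p.2)) popped

-- ===== PORT B =====
-- if d not in seen: seen.add(d); merged.append(d)
def bMergeStep (st : PySem.Set String × List String) (d : String) : PySem.Set String × List String :=
  if PySem.Set.contains st.1 d then st else (PySem.Set.add st.1 d, st.2 ++ [d])

-- while i < n and not Dependencies-header: result.append(lines[i]); i += 1
def bCopyUntil (acc : List String) : List String → List String × List String
  | [] => (acc, [])
  | l :: ls => if isDepHdr l then (acc, l :: ls) else bCopyUntil (acc ++ [l]) ls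

-- lookahead 'i + 1 < n and skill_lines[i+1].strip().startswith('*')'
def bNextStar : List String → Bool
  | l2 :: _ => isStar l2
  | [] => false

-- while i < n and (star or (blank and next is star)): i += 1   (returns the remaining suffix)
def bSkip : List String → List String
  | [] => []
  | l :: ls =>
      if isStar l || (isBlank l && bNextStar ls) then bSkip ls
      else l :: ls

-- for k, line in enumerate(lines): if Description: last_desc = k
def bLastDesc : List (Int × String) → Option Int → Option Int
  | [], acc => acc
  | (k, l) :: rest, acc => bLastDesc rest (if isDescHdr l then some k else acc)

-- while p < n and (lines[p].startswith('  ') or not lines[p].strip()): p += 1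
def bAdvance (lines : List String) (p : Int) : Int :=
  if h : p < PySem.List.len lines ∧ (PySem.Str.startswith (PySem.List.pyGetD lines p "") "  " = true ∨ isBlank (PySem.List.pyGetD lines p "") = true) then
    bAdvance lines (p + 1)
  else p
termination_by (PySem.List.len lines - p).toNat
decreasing_by simp [PySem.List.len] at h ⊢; omega

def update_depends_on_alt (skill_lines : List String) (current_deps : List String) (new_deps : List String) : List String :=
  let merged := ((current_deps ++ new_deps).foldl bMergeStep (PySem.Set.empty, [])).2
  let dep_lines := merged.map depLine
  match bCopyUntil [] skill_lines with
  | (res, hdr :: rest) => res ++ hdr :: (dep_lines ++ bSkip rest)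
  | (_, []) =>
      let p := match bLastDesc (PySem.List.enumerate skill_lines 0) none with
               | none => PySem.List.len skill_lines - 1
               | some k => bAdvance skill_lines (k + 1)
      PySem.List.slice skill_lines none (some p) ++
        "\n" :: "Dependencies:\n" :: (dep_lines ++ "\n" :: PySem.List.slice skill_lines (some p) none)

-- ===== PRECONDITION & SPEC =====
-- On empty skill_lines A's insert(-1, …) wraps around and emits the new block out of
-- order (['Dependencies:\n', deps…, '\n', '\n']); B emits the intended block
-- ['\n', 'Dependencies:\n', deps…, '\n'] as on every other no-Dependencies input.
def D_update_depends_on (skill_lines : List String) (current_deps : List String) (new_deps : List String) : Prop := skill_lines = []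
instance (skill_lines : List String) (current_deps : List String) (new_deps : List String) : Decidable (D_update_depends_on skill_lines current_deps new_deps) := by unfold D_update_depends_on; infer_instance

def Spec_update_depends_on (skill_lines : List String) (current_deps : List String) (new_deps : List String) (out : List String) : Prop := ¬ D_update_depends_on skill_lines current_deps new_deps → out = update_depends_on_alt skill_lines current_deps new_deps
instance (skill_lines : List String) (current_deps : List String) (new_deps : List String) (out : List String) : Decidable (Spec_update_depends_on skill_lines current_deps new_deps out) := by unfold Spec_update_depends_on; infer_instance

def pvDiffWitness_update_depends_on : List String × List String × List String := ([], ["a"], [])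
def pvDiffWitnessOut_update_depends_on : (List String) × (List String) :=
  (["Dependencies:\n", "* a\n", "\n", "\n"], ["\n", "Dependencies:\n", "* a\n", "\n"])

-- ===== CLAIM (what is proved, stated in full; the proofs are below) =====
def Claim_unchanged_update_depends_on : Prop := ∀ (skill_lines : List String) (current_deps : List String) (new_deps : List String), Dom_update_depends_on skill_lines current_deps new_deps → Spec_update_depends_on skill_lines current_deps new_deps (update_depends_on skill_lines current_deps new_deps)
def Claim_changed_update_depends_on : Prop := Dom_update_depends_on (pvDiffWitness_update_depends_on.1) (pvDiffWitness_update_depends_on.2.1) (pvDiffWitness_update_depends_on.2.2) ∧ D_update_depends_on (pvDiffWitness_update_depends_on.1) (pvDiffWitness_update_depends_on.2.1) (pvDiffWitness_update_depends_on.2.2) ∧ update_depends_on (pvDiffWitness_update_depends_on.1) (pvDiffWitness_update_depends_on.2.1) (pvDiffWitness_update_depends_on.2.2) = pvDiffWitnessOut_update_depends_on.1 ∧ update_depends_on_alt (pvDiffWitness_update_depends_on.1) (pvDiffWitness_update_depends_on.2.1) (pvDiffWitness_update_depends_on.2.2) = pvDiffWitnessOut_update_depends_on.2 ∧ pvDiffWitnessOut_update_depends_on.1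 ≠ pvDiffWitnessOut_update_depends_on.2
def Claim_exact_update_depends_on : Prop := ∀ (skill_lines : List String) (current_deps : List String) (new_deps : List String), Dom_update_depends_on skill_lines current_deps new_deps → D_update_depends_on skill_lines current_deps new_deps → update_depends_on skill_lines current_deps new_deps ≠ update_depends_on_alt skill_lines current_deps new_deps

-- ===== LEMMAS AND PROOFS =====


-- merged list computed by B's seen-set loop = A's dict.fromkeys dedup
theorem pv_mergeStep_diag (s : PySem.Set String) (d : String) :
    bMergeStep (s, s) d = (PySem.Set.add s d, PySem.Set.add s d) := by
  unfold bMergeStep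
  by_cases h : d ∈ s
  · simp [h]
  · simp [h]

theorem pv_merge_eq (l : List String) :
    (l.foldl bMergeStep (PySem.Set.empty, [])).2 = PySem.List.dedup l := by
  have key : ∀ (l : List String) (s : PySem.Set String),
      l.foldl bMergeStep (s, s) = (l.foldl PySem.Set.add s, l.foldl PySem.Set.add s) := by
    intro l
    induction l with
    | nil => intro s; rfl
    | cons d t ih => intro s; simp [List.foldl_cons, pv_mergeStep_diag, ih]
  have h0 : (PySem.Set.empty, ([] : List String)) = (([] : PySem.Set String), ([] : PySem.Set String)) := rfl
  rw [h0, key, PySem.List.dedup_eq_ofList, PySem.Set.ofList_eq_foldl]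

-- inserting at the length of a known prefix splices right there
theorem pv_insert_front {α : Type} (front t : List α) (v : α) :
    PySem.List.insert (front ++ t) (front.length : Int) v = front ++ v :: t := by
  rw [PySem.List.insert_natCast _ front.length _ (by simp)]
  simp

-- A's enumerate scan for the Dependencies header
theorem pv_aFindDep_none (lines : List String) :
    (∀ l ∈ lines, isDepHdr l = false) → ∀ s : Int, aFindDep (PySem.List.enumerate lines s) = none := by
  induction lines with
  | nil => intro _ s; rfl
  | cons x xs ih =>
      intro h s
      rw [PySem.List.enumerate_cons]
      simp only [aFindDep, h x (by simp)]
      exact ih (fun l hl => h l (by simp [hl])) (s + 1)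

theorem pv_aFindDep_found (pre : List String) (h0 : String) (suf : List String)
    (hpre : ∀ l ∈ pre, isDepHdr l = false) (hh : isDepHdr h0 = true) :
    ∀ s : Int, aFindDep (PySem.List.enumerate (pre ++ h0 :: suf) s) = some (s + pre.length) := by
  induction pre with
  | nil => intro s; rw [List.nil_append, PySem.List.enumerate_cons]; simp [aFindDep, hh]
  | cons x xs ih =>
      intro s
      rw [List.cons_append, PySem.List.enumerate_cons]
      simp only [aFindDep, hpre x (by simp)]
      rw [ih (fun l hl => hpre l (by simp [hl])) (s + 1)]
      simp only [Bool.false_eq_true, if_false, Option.some_inj, List.length_cons]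
      push_cast
      ring

-- B's copy-until-header scan
theorem pv_bCopyUntil_none (lines : List String) :
    (∀ l ∈ lines, isDepHdr l = false) → ∀ acc, bCopyUntil acc lines = (acc ++ lines, []) := by
  induction lines with
  | nil => intro _ acc; simp [bCopyUntil]
  | cons x xs ih =>
      intro h acc
      simp only [bCopyUntil, h x (by simp)]
      rw [ih (fun l hl => h l (by simp [hl]))]
      simp

theorem pv_bCopyUntil_found (pre : List String) (h0 : String) (suf : List String)
    (hpre : ∀ l ∈ pre, isDepHdr l = false) (hh : isDepHdr h0 = true) :
    ∀ acc, bCopyUntil acc (pre ++ h0 :: suf) = (acc ++ pre, h0 :: suf) := by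
  induction pre with
  | nil => intro acc; simp [bCopyUntil, hh]
  | cons x xs ih =>
      intro acc
      simp only [List.cons_append, bCopyUntil, hpre x (by simp)]
      rw [ih (fun l hl => hpre l (by simp [hl]))]
      simp


-- A's enumerate-driven dependency-insert loop appends the dep lines after `front`
theorem pv_aInsFold (ds : List String) :
    ∀ (s : Int) (front t : List String) (b : Int), b + s = (front.length : Int) →
      (PySem.List.enumerate ds s).foldl
          (fun ls p => PySem.List.insert ls (b + p.1) (depLine p.2)) (front ++ t)
        = front ++ ds.map depLine ++ t := by
  induction ds with
  | nil => intro s front t b _; simp [PySem.List.enumerate_nil]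
  | cons d ds ih =>
      intro s front t b hb
      rw [PySem.List.enumerate_cons]
      simp only [List.foldl_cons]
      rw [hb, pv_insert_front front t (depLine d)]
      have h1 : front ++ depLine d :: t = (front ++ [depLine d]) ++ t := by simp
      rw [h1, ih (s + 1) (front ++ [depLine d]) t b (by simp [← hb]; ring)]
      simp

-- A's pair-state insert loop in the no-Dependencies branch
theorem pv_aPairFold (ds : List String) :
    ∀ (front t : List String) (q : Int), q + 2 = (front.length : Int) →
      ds.foldl (fun (st : List String × Int) dep => (PySem.List.insert st.1 (st.2 + 2) (depLine dep), st.2 + 1)) (front ++ t, q)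
        = (front ++ ds.map depLine ++ t, q + ds.length) := by
  induction ds with
  | nil => intro front t q _; simp
  | cons d ds ih =>
      intro front t q hq
      simp only [List.foldl_cons]
      rw [hq, pv_insert_front front t (depLine d)]
      have h1 : front ++ depLine d :: t = (front ++ [depLine d]) ++ t := by simp
      rw [h1, ih (front ++ [depLine d]) t (q + 1) (by simp [← hq]; ring)]
      simp only [List.length_cons, List.map_cons, Prod.mk.injEq]
      refine ⟨by simp, by push_cast; ring⟩

theorem pv_pop_front (front t : List String) (x : String) :
    PySem.List.pop? (front ++ x :: t) (front.length : Int) = some (x, front ++ t) := by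
  rw [PySem.List.pop?_natCast _ front.length (by simp)]
  simp [List.eraseIdx_append_of_length_le (le_refl front.length)]

theorem pv_pyGetD_front (front t : List String) (x : String) (d : String) :
    PySem.List.pyGetD (front ++ x :: t) (front.length : Int) d = x := by
  simp [PySem.List.pyGetD]

theorem pv_popLoop_eq (front : List String) :
    ∀ rest : List String, aPopLoop (front ++ rest) (front.length : Int) = front ++ bSkip rest := by
  intro rest
  induction rest with
  | nil =>
      rw [aPopLoop, dif_neg]
      · simp [bSkip]
      · simp [PySem.List.len]
  | cons x t ih =>
      have hlen : PySem.List.len (front ++ x :: t) = (front.length : Int) + t.length + 1 := by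
        simp [PySem.List.len]; push_cast; ring
      have hx := pv_pyGetD_front front t x ""
      have hcond : ((front.length : Int) < PySem.List.len (front ++ x :: t) ∧
          (isStar (PySem.List.pyGetD (front ++ x :: t) (front.length : Int) "") = true ∨
           (isBlank (PySem.List.pyGetD (front ++ x :: t) (front.length : Int) "") = true ∧
            (front.length : Int) < PySem.List.len (front ++ x :: t) - 1 ∧
            isStar (PySem.List.pyGetD (front ++ x :: t) ((front.length : Int) + 1) "") = true)))
          ↔ (isStar x || (isBlank x && bNextStar t)) = true := by
        rw [hlen, hx]
        cases t with
        | nil =>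
            simp [PySem.List.pyGetD, bNextStar]
        | cons y t' =>
            have hy : PySem.List.pyGetD (front ++ x :: y :: t') ((front.length : Int) + 1) "" = y := by
              have h2 : (front ++ x :: y :: t') = (front ++ [x]) ++ y :: t' := by simp
              have hl : ((front.length : Int) + 1) = (((front ++ [x]).length : Nat) : Int) := by simp
              rw [h2, hl, pv_pyGetD_front (front ++ [x]) t' y ""]
            rw [hy]
            simp only [List.length_cons, Bool.or_eq_true, Bool.and_eq_true, bNextStar]
            constructor
            · rintro ⟨-, h | ⟨hb, -, hs⟩⟩
              · simp [h]
              · simp [hb, hs]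
            · intro h
              refine ⟨by push_cast; omega, ?_⟩
              rcases h with h | ⟨hb, hs⟩
              · exact Or.inl h
              · exact Or.inr ⟨hb, by push_cast; omega, hs⟩
      rw [aPopLoop]
      split
      · next hg =>
          split
          · next r hp =>
              rw [pv_pop_front] at hp
              cases hp
              rw [ih]
              have hc := hcond.mp hg
              simp only [bSkip, hc, if_pos]
          · next hp =>
              rw [pv_pop_front] at hp
              cases hp
      · next hg =>
          have hc : (isStar x || (isBlank x && bNextStar t)) = false := by
            rcases Bool.eq_false_or_eq_true (isStar x || (isBlank x && bNextStar t)) with h | h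
            · exact absurd (hcond.mpr h) hg
            · exact h
          simp only [bSkip]
          rw [if_neg (by simp [hc])]


-- the two post-Description advance loops compute the same index (A's extra slot is dead)
theorem pv_advance_eq (lines : List String) :
    ∀ (n : Nat) (j acc : Int), (PySem.List.len lines - j).toNat ≤ n →
      (aDescEnd lines acc j).2 = bAdvance lines j := by
  intro n
  induction n with
  | zero =>
      intro j acc h
      have hng : ¬ (j < PySem.List.len lines ∧ (PySem.Str.startswith (PySem.List.pyGetD lines j "") "  " = true ∨ isBlank (PySem.List.pyGetD lines j "") = true)) := by
        rintro ⟨hj, -⟩; omega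
      rw [aDescEnd, dif_neg hng, bAdvance, dif_neg hng]
  | succ n ih =>
      intro j acc h
      by_cases hg : (j < PySem.List.len lines ∧ (PySem.Str.startswith (PySem.List.pyGetD lines j "") "  " = true ∨ isBlank (PySem.List.pyGetD lines j "") = true))
      · rw [aDescEnd, dif_pos hg, bAdvance, dif_pos hg]
        exact ih (j + 1) _ (by omega)
      · rw [aDescEnd, dif_neg hg, bAdvance, dif_neg hg]

theorem pv_bAdvance_bounds (lines : List String) :
    ∀ (n : Nat) (j : Int), (PySem.List.len lines - j).toNat ≤ n →
      j ≤ bAdvance lines j ∧ (j ≤ PySem.List.len lines → bAdvance lines j ≤ PySem.List.len lines) := by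
  intro n
  induction n with
  | zero =>
      intro j h
      have hng : ¬ (j < PySem.List.len lines ∧ (PySem.Str.startswith (PySem.List.pyGetD lines j "") "  " = true ∨ isBlank (PySem.List.pyGetD lines j "") = true)) := by
        rintro ⟨hj, -⟩; omega
      rw [bAdvance, dif_neg hng]
      exact ⟨le_refl _, fun h => h⟩
  | succ n ih =>
      intro j h
      by_cases hg : (j < PySem.List.len lines ∧ (PySem.Str.startswith (PySem.List.pyGetD lines j "") "  " = true ∨ isBlank (PySem.List.pyGetD lines j "") = true)) 
      · rw [bAdvance, dif_pos hg]
        have := ih (j + 1) (by omega)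
        exact ⟨by omega, fun _ => this.2 (by omega)⟩
      · rw [bAdvance, dif_neg hg]
        exact ⟨le_refl _, fun h => h⟩

theorem pv_mem_of_pyGetD (lines : List String) (i : Int) (h0 : 0 ≤ i) (h1 : i < PySem.List.len lines) :
    PySem.List.pyGetD lines i "" ∈ lines := by
  apply PySem.List.pyGetD_mem
  simp [PySem.Raise.InRange, PySem.List.len] at *
  omega

theorem pv_aRevScan_none (lines : List String) (h : ∀ l ∈ lines, isDescHdr l = false) :
    ∀ (r : List Int) (acc : Int), (∀ i ∈ r, 0 ≤ i ∧ i < PySem.List.len lines) →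
      aRevScan lines r acc = acc := by
  intro r
  induction r with
  | nil => intro acc _; rfl
  | cons i rest ih =>
      intro acc hr
      have hi := hr i (by simp)
      simp only [aRevScan, h _ (pv_mem_of_pyGetD lines i hi.1 hi.2)]
      exact ih acc (fun i hi => hr i (by simp [hi]))

theorem pv_bLastDesc_none (lines : List String) (h : ∀ l ∈ lines, isDescHdr l = false) :
    ∀ (s : Int) (acc : Option Int), bLastDesc (PySem.List.enumerate lines s) acc = acc := by
  induction lines with
  | nil => intro s acc; rfl
  | cons x xs ih =>
      intro s acc
      rw [PySem.List.enumerate_cons]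
      simp only [bLastDesc, h x (by simp)]
      exact ih (fun l hl => h l (by simp [hl])) (s + 1) acc

theorem pv_bLastDesc_found (g : String) (suf2 : List String)
    (hg : isDescHdr g = true) (hsuf : ∀ l ∈ suf2, isDescHdr l = false) :
    ∀ (pre2 : List String) (s : Int) (acc : Option Int),
      bLastDesc (PySem.List.enumerate (pre2 ++ g :: suf2) s) acc = some (s + pre2.length) := by
  intro pre2
  induction pre2 with
  | nil =>
      intro s acc
      rw [List.nil_append, PySem.List.enumerate_cons]
      simp only [bLastDesc, hg, if_pos]
      rw [pv_bLastDesc_none suf2 hsuf (s + 1) (some s)]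
      simp
  | cons x xs ih =>
      intro s acc
      rw [List.cons_append, PySem.List.enumerate_cons]
      simp only [bLastDesc]
      rw [ih (s + 1)]
      simp only [List.length_cons, Option.some_inj]
      push_cast
      ring

theorem pv_pyGetD_suf (pre2 : List String) (g : String) (suf2 : List String) (k : Nat)
    (hk : k < suf2.length) :
    PySem.List.pyGetD (pre2 ++ g :: suf2) ((pre2.length : Int) + (k + 1)) "" ∈ suf2 := by
  have h1 : ((pre2.length : Int) + (k + 1)) = ((pre2.length : Int) + ((k + 1 : Nat) : Int)) := by push_cast; ring
  rw [h1, PySem.List.pyGetD, PySem.List.pyGet?_append_right pre2 (g :: suf2) (k + 1)]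
  have h2 : (g :: suf2)[k + 1]? = suf2[k]? := rfl
  rw [h2, List.getElem?_eq_getElem hk]
  simp [List.getElem_mem]

theorem pv_aRevScan_found (pre2 : List String) (g : String) (suf2 : List String)
    (hg : isDescHdr g = true) (hsuf : ∀ l ∈ suf2, isDescHdr l = false) :
    ∀ (n : Nat) (a : Int) (acc : Int), (pre2.length : Int) ≤ a →
      a < PySem.List.len (pre2 ++ g :: suf2) → (a - pre2.length).toNat ≤ n →
      aRevScan (pre2 ++ g :: suf2) (PySem.List.pyRange a (-1) (-1)) acc
        = (aDescEnd (pre2 ++ g :: suf2) acc ((pre2.length : Int) + 1)).2 := by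
  intro n
  induction n with
  | zero =>
      intro a acc h1 h2 h3
      have ha : a = (pre2.length : Int) := by omega
      subst ha
      rw [PySem.List.pyRange_neg_one_cons (show (-1 : Int) < (pre2.length : Int) by omega)]
      have hget : PySem.List.pyGetD (pre2 ++ g :: suf2) ((pre2.length : Nat) : Int) "" = g := by
        simp [PySem.List.pyGetD]
      simp only [aRevScan, hget, hg, if_pos]
  | succ n ih =>
      intro a acc h1 h2 h3
      by_cases ha : a = (pre2.length : Int)
      · subst ha
        rw [PySem.List.pyRange_neg_one_cons (show (-1 : Int) < (pre2.length : Int) by omega)]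
        have hget : PySem.List.pyGetD (pre2 ++ g :: suf2) ((pre2.length : Nat) : Int) "" = g := by
          simp [PySem.List.pyGetD]
        simp only [aRevScan, hget, hg, if_pos]
      · have hgt : (pre2.length : Int) < a := lt_of_le_of_ne h1 (fun h => ha h.symm)
        rw [PySem.List.pyRange_neg_one_cons (show (-1 : Int) < a by omega)]
        set k : Nat := (a - pre2.length - 1).toNat with hk
        have hak : a = (pre2.length : Int) + (k + 1) := by omega
        have hklt : k < suf2.length := by
          simp [PySem.List.len] at h2
          omega
        have hmem := pv_pyGetD_suf pre2 g suf2 k hklt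
        have hfalse : isDescHdr (PySem.List.pyGetD (pre2 ++ g :: suf2) a "") = false := by
          rw [hak]; exact hsuf _ hmem
        simp only [aRevScan, hfalse]
        exact ih (a - 1) acc (by omega) (by omega) (by omega)


theorem pv_exists_first {α : Type} (p : α → Bool) :
    ∀ l : List α, (¬ ∀ x ∈ l, p x = false) →
      ∃ pre x suf, l = pre ++ x :: suf ∧ p x = true ∧ ∀ y ∈ pre, p y = false := by
  intro l
  induction l with
  | nil => intro h; exact absurd (by simp) h
  | cons a t ih =>
      intro h
      by_cases ha : p a = true
      · exact ⟨[], a, t, by simp, ha, by simp⟩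
      · have ha' : p a = false := by simpa using ha
        have ht : ¬ ∀ x ∈ t, p x = false := by
          intro hall
          exact h (by intro x hx; rcases List.mem_cons.mp hx with rfl | hx; exact ha'; exact hall x hx)
        obtain ⟨pre, x, suf, rfl, hx, hpre⟩ := ih ht
        exact ⟨a :: pre, x, suf, by simp, hx, by
          intro y hy
          rcases List.mem_cons.mp hy with rfl | hy
          · exact ha'
          · exact hpre y hy⟩

theorem pv_exists_last {α : Type} (p : α → Bool) :
    ∀ l : List α, (¬ ∀ x ∈ l, p x = false) →
      ∃ pre x suf, l = pre ++ x :: suf ∧ p x = true ∧ ∀ y ∈ suf, p y = false := by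
  intro l
  induction l with
  | nil => intro h; exact absurd (by simp) h
  | cons a t ih =>
      intro h
      by_cases ht : ∀ x ∈ t, p x = false
      · have ha : p a = true := by
          by_contra hna
          exact h (by intro x hx; rcases List.mem_cons.mp hx with rfl | hx
                      · simpa using hna
                      · exact ht x hx)
        exact ⟨[], a, t, by simp, ha, ht⟩
      · obtain ⟨pre, x, suf, rfl, hx, hsuf⟩ := ih ht
        exact ⟨a :: pre, x, suf, by simp, hx, hsuf⟩


theorem pv_case_found (pre : List String) (h0 : String) (suf : List String)
    (cd nd : List String) (hpre : ∀ l ∈ pre, isDepHdr l = false) (hh : isDepHdr h0 = true) :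
    update_depends_on (pre ++ h0 :: suf) cd nd = update_depends_on_alt (pre ++ h0 :: suf) cd nd := by
  rw [update_depends_on, update_depends_on_alt]
  rw [pv_aFindDep_found pre h0 suf hpre hh 0]
  rw [pv_bCopyUntil_found pre h0 suf hpre hh []]
  simp only [List.nil_append]
  rw [pv_merge_eq (cd ++ nd)]
  have hidx : (0 : Int) + (pre.length : Int) + 1 = (((pre ++ [h0]).length : Nat) : Int) := by
    push_cast; simp
  have hsplit : pre ++ h0 :: suf = (pre ++ [h0]) ++ suf := by simp
  rw [hsplit, hidx, pv_popLoop_eq (pre ++ [h0]) suf]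
  rw [pv_aInsFold (PySem.List.dedup (cd ++ nd)) 0 (pre ++ [h0]) (bSkip suf) (((pre ++ [h0]).length : Nat) : Int) (by ring)]
  simp


-- A's four-stage insert chain in the no-Dependencies branch is one splice at q
theorem pv_chain (lines ds : List String) (q : Nat) (hq : q ≤ lines.length) :
    PySem.List.insert
      (ds.foldl (fun (st : List String × Int) dep => (PySem.List.insert st.1 (st.2 + 2) (depLine dep), st.2 + 1))
        (PySem.List.insert (PySem.List.insert lines (q : Int) "\n") ((q : Int) + 1) "Dependencies:\n", (q : Int))).1
      ((ds.foldl (fun (st : List String × Int) dep => (PySem.List.insert st.1 (st.2 + 2) (depLine dep), st.2 + 1))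
        (PySem.List.insert (PySem.List.insert lines (q : Int) "\n") ((q : Int) + 1) "Dependencies:\n", (q : Int))).2 + 2) "\n"
    = lines.take q ++ "\n" :: "Dependencies:\n" :: (ds.map depLine ++ "\n" :: lines.drop q) := by
  have h1 : PySem.List.insert lines (q : Int) "\n" = (lines.take q ++ ["\n"]) ++ lines.drop q := by
    rw [PySem.List.insert_natCast _ q _ hq]; simp
  have hlen1 : (lines.take q ++ ["\n"]).length = q + 1 := by simp [List.length_take, Nat.min_eq_left hq]
  have h2 : ((q : Int) + 1) = (((lines.take q ++ ["\n"]).length : Nat) : Int) := by rw [hlen1]; push_cast; ring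
  rw [h1, h2, pv_insert_front (lines.take q ++ ["\n"]) (lines.drop q) "Dependencies:\n"]
  have h3 : (lines.take q ++ ["\n"]) ++ "Dependencies:\n" :: lines.drop q
      = (lines.take q ++ ["\n", "Dependencies:\n"]) ++ lines.drop q := by simp
  rw [h3, pv_aPairFold ds (lines.take q ++ ["\n", "Dependencies:\n"]) (lines.drop q) (q : Int)
        (by simp [List.length_take, Nat.min_eq_left hq])]
  have h4 : (lines.take q ++ ["\n", "Dependencies:\n"]) ++ ds.map depLine ++ lines.drop q
      = ((lines.take q ++ ["\n", "Dependencies:\n"]) ++ ds.map depLine) ++ lines.drop q := by simp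
  have h5 : ((q : Int) + ds.length) + 2
      = ((((lines.take q ++ ["\n", "Dependencies:\n"]) ++ ds.map depLine).length : Nat) : Int) := by
    simp [List.length_take, Nat.min_eq_left hq]; ring
  simp only []
  rw [h4, h5, pv_insert_front ((lines.take q ++ ["\n", "Dependencies:\n"]) ++ ds.map depLine) (lines.drop q) "\n"]
  simp

theorem pv_case_none (sl cd nd : List String) (hne : sl ≠ [])
    (hdep : ∀ l ∈ sl, isDepHdr l = false) :
    update_depends_on sl cd nd = update_depends_on_alt sl cd nd := by
  have hlenpos : 0 < sl.length := List.length_pos_iff.mpr hne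
  have hkey : ∃ q : Nat, q ≤ sl.length ∧
      aRevScan sl (PySem.List.pyRange (PySem.List.len sl - 1) (-1) (-1)) (PySem.List.len sl - 1) = (q : Int) ∧
      (match bLastDesc (PySem.List.enumerate sl 0) none with
       | none => PySem.List.len sl - 1
       | some k => bAdvance sl (k + 1)) = (q : Int) := by
    by_cases hdesc : ∀ l ∈ sl, isDescHdr l = false
    · refine ⟨sl.length - 1, by omega, ?_, ?_⟩
      · rw [pv_aRevScan_none sl hdesc _ _ ?_]
        · simp [PySem.List.len, Nat.cast_sub (show 1 ≤ sl.length by omega)]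
        · intro i hi
          rw [PySem.List.mem_pyRange_neg_one] at hi
          simp [PySem.List.len] at *
          omega
      · rw [pv_bLastDesc_none sl hdesc 0 none]
        simp [PySem.List.len, Nat.cast_sub (show 1 ≤ sl.length by omega)]
    · obtain ⟨pre2, g, suf2, heq, hg, hsuf⟩ := pv_exists_last isDescHdr sl hdesc
      subst heq
      have hlen : PySem.List.len (pre2 ++ g :: suf2) = (pre2.length : Int) + suf2.length + 1 := by
        simp [PySem.List.len]; ring
      have hbnd := pv_bAdvance_bounds (pre2 ++ g :: suf2)
        (PySem.List.len (pre2 ++ g :: suf2) - ((pre2.length : Int) + 1)).toNat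
        ((pre2.length : Int) + 1) (by omega)
      have hble : ((pre2.length : Int) + 1) ≤ PySem.List.len (pre2 ++ g :: suf2) := by omega
      have h0le : (0 : Int) ≤ bAdvance (pre2 ++ g :: suf2) ((pre2.length : Int) + 1) := by
        have := hbnd.1; omega
      refine ⟨(bAdvance (pre2 ++ g :: suf2) ((pre2.length : Int) + 1)).toNat, ?_, ?_, ?_⟩
      · have := hbnd.2 hble
        simp [PySem.List.len] at this ⊢
        omega
      · rw [pv_aRevScan_found pre2 g suf2 hg hsuf
            ((PySem.List.len (pre2 ++ g :: suf2) - 1) - pre2.length).toNat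
            (PySem.List.len (pre2 ++ g :: suf2) - 1) _ (by omega) (by omega) (by omega)]
        rw [pv_advance_eq (pre2 ++ g :: suf2)
            (PySem.List.len (pre2 ++ g :: suf2) - ((pre2.length : Int) + 1)).toNat _ _ (by omega)]
        omega
      · rw [pv_bLastDesc_found g suf2 hg hsuf pre2 0 none]
        simp only [Int.toNat_of_nonneg h0le, zero_add]
  obtain ⟨q, hqle, hA, hB⟩ := hkey
  rw [update_depends_on, update_depends_on_alt]
  rw [pv_aFindDep_none sl hdep 0]
  rw [pv_bCopyUntil_none sl hdep []]
  simp only []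
  rw [pv_merge_eq (cd ++ nd)]
  rw [hA, hB]
  rw [pv_chain sl (PySem.List.dedup (cd ++ nd)) q hqle]
  rw [PySem.List.slice_to_natCast, PySem.List.slice_from_natCast]

theorem pv_main : ∀ (skill_lines : List String) (current_deps : List String) (new_deps : List String), skill_lines ≠ [] → update_depends_on skill_lines current_deps new_deps = update_depends_on_alt skill_lines current_deps new_deps := by
  intro sl cd nd hne
  by_cases hdep : ∀ l ∈ sl, isDepHdr l = false
  · exact pv_case_none sl cd nd hne hdep
  · obtain ⟨pre, h0, suf, rfl, hh, hpre⟩ := pv_exists_first isDepHdr sl hdep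
    exact pv_case_found pre h0 suf cd nd hpre hh


-- Python list.insert at a positive index never touches the head
theorem pv_insert_head (x v : String) (l : List String) (i : Int) (hi : 1 ≤ i) :
    ∃ t, PySem.List.insert (x :: l) i v = x :: t := by
  simp only [PySem.List.insert, PySem.List.sliceIndices]
  simp only [show ¬ (1 : Int) < 0 by omega, if_false, show ¬ i < 0 by omega]
  have hm : (min i ((x :: l).length : Int)).toNat = ((min i ((x :: l).length : Int)).toNat - 1) + 1 := by
    simp only [List.length_cons]
    omega
  rw [hm, List.take_succ_cons, List.drop_succ_cons]
  exact ⟨_, rfl⟩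

theorem pv_foldHead (x : String) (ds : List String) :
    ∀ (l : List String) (q : Int), -1 ≤ q →
      ∃ l', ds.foldl (fun (st : List String × Int) dep => (PySem.List.insert st.1 (st.2 + 2) (depLine dep), st.2 + 1)) (x :: l, q)
              = (x :: l', q + ds.length) := by
  induction ds with
  | nil => intro l q _; exact ⟨l, by simp⟩
  | cons d ds ih =>
      intro l q hq
      simp only [List.foldl_cons]
      obtain ⟨t, ht⟩ := pv_insert_head x (depLine d) l (q + 2) (by omega)
      rw [ht]
      obtain ⟨l', hl'⟩ := ih t (q + 1) (by omega)
      refine ⟨l', ?_⟩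
      rw [hl']
      simp only [Prod.mk.injEq, List.length_cons]
      exact ⟨trivial, by push_cast; ring⟩

-- ===== VERDICT (by name: the statement is the Claim_ definition above) =====
theorem update_depends_on_spec : Claim_unchanged_update_depends_on := by
  intro sl cd nd _ hD
  exact pv_main sl cd nd hD

theorem update_depends_on_changed : Claim_changed_update_depends_on := by
  unfold Claim_changed_update_depends_on; decide

theorem update_depends_on_tight : Claim_exact_update_depends_on := by
  unfold Claim_exact_update_depends_on
  intro sl cd nd _ hD
  unfold D_update_depends_on at hD
  subst hD
  have e0 : PySem.List.len ([] : List String) - 1 = (-1 : Int) := by simp [PySem.List.len]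
  have e1 : PySem.List.pyRange (-1) (-1) (-1) = ([] : List Int) := PySem.List.pyRange_neg_one_eq_nil (le_refl _)
  have e2 : PySem.List.insert ([] : List String) (-1) "\n" = ["\n"] := by decide
  have e3 : PySem.List.insert ["\n"] ((-1 : Int) + 1) "Dependencies:\n" = ["Dependencies:\n", "\n"] := by decide
  have hA : ∃ t, update_depends_on [] cd nd = "Dependencies:\n" :: t := by
    rw [update_depends_on]
    simp only [PySem.List.enumerate_nil, aFindDep, e0, e1, aRevScan, e2, e3]
    obtain ⟨l2, hl2⟩ := pv_foldHead "Dependencies:\n" (PySem.List.dedup (cd ++ nd)) ["\n"] (-1) (by omega)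
    rw [hl2]
    exact pv_insert_head _ _ _ _ (by omega)
  have hB : update_depends_on_alt [] cd nd
      = "\n" :: ("Dependencies:\n" :: ((((cd ++ nd).foldl bMergeStep (PySem.Set.empty, [])).2.map depLine) ++ "\n" :: [])) := by
    rw [update_depends_on_alt]
    simp only [bCopyUntil, PySem.List.enumerate_nil, bLastDesc]
    simp [PySem.List.slice]
  obtain ⟨t, hAt⟩ := hA
  intro h
  rw [hAt, hB] at h
  injection h with h1 _
  exact absurd h1 (by decide)
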